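-- pv_equiv track=rewrite | github.com/lbliii/patitas | src/patitas/parsing/blocks/list/fast_path.py | _is_complex_content
-- ===== SOURCE A (Python) =====
-- def _is_complex_content(content: str) -> bool:
--     """Check if paragraph content requires complex parsing.
--
--     Returns True if content contains patterns that need special handling.
--     """
--     if not content:
--         return False
--
--     first_char = content[0]
--
--     # Rule 6: HTML-like content
--     if first_char == "<":
--         return True
--
--     # Rule 8: Block quote marker
--     if first_char == ">":
--         return True
--
--     # Rule 5: Nested list marker (unordered)
--     if first_char in "-*+":
--         if len(content) > 1 and content[1] in " \t":
--             return True
--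
--     # Rule 5: Ordered list marker (digit followed by . or ))
--     if first_char.isdigit():
--         pos = 0
--         while pos < len(content) and content[pos].isdigit():
--             pos += 1
--         if pos < len(content) and content[pos] in ".)":
--             if pos + 1 < len(content) and content[pos + 1] in " \t":
--                 return True
--             if pos + 1 == len(content):
--                 return True
--
--     # Rule 7: Code fence markers
--     if content.startswith("```") or content.startswith("~~~"):
--         return True
--
--     # Rule 7: Potential setext underline (at least 3 chars)
--     if len(content) >= 3:
--         stripped = content.rstrip()
--         if stripped and all(c == "=" for c in stripped):
--             return True
--         if stripped and all(c == "-" for c in stripped):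
--             return True
--
--     return False
-- ===== SOURCE B (Python) =====
-- def _is_complex_content(content: str) -> bool:
--     """One-pass finite state machine over the characters (no slicing, no rescans)."""
--     WS = " \t\n\r\x0b\x0c"  # Python str whitespace (ASCII)
--     state = "START"
--     n = 0
--     for ch in content:
--         n += 1
--         if state == "START":
--             if ch in "<>":
--                 return True
--             elif ch == "`":
--                 state = "BTICK1"
--             elif ch == "~":
--                 state = "TILDE1"
--             elif ch == "-":
--                 state = "DASH1"
--             elif ch in "*+":
--                 state = "BULLET"
--             elif ch.isdigit():
--                 state = "DIGITS"
--             elif ch == "=":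
--                 state = "EQRUN"
--             else:
--                 return False
--         elif state == "BULLET":
--             return ch in " \t"
--         elif state == "DASH1":
--             if ch in " \t":
--                 return True
--             elif ch == "-":
--                 state = "DASHRUN"
--             elif ch in WS:
--                 state = "DASHTAIL"
--             else:
--                 return False
--         elif state == "DASHRUN":
--             if ch == "-":
--                 pass
--             elif ch in WS:
--                 state = "DASHTAIL"
--             else:
--                 return False
--         elif state == "DASHTAIL":
--             if ch not in WS:
--                 return False
--         elif state == "EQRUN":
--             if ch == "=":
--                 pass
--             elif ch in WS:
--                 state = "EQTAIL"
--             else: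
--                 return False
--         elif state == "EQTAIL":
--             if ch not in WS:
--                 return False
--         elif state == "DIGITS":
--             if ch.isdigit():
--                 pass
--             elif ch in ".)":
--                 state = "MARK"
--             else:
--                 return False
--         elif state == "MARK":
--             return ch in " \t"
--         elif state == "BTICK1":
--             if ch == "`":
--                 state = "BTICK2"
--             else:
--                 return False
--         elif state == "BTICK2":
--             return ch == "`"
--         elif state == "TILDE1":
--             if ch == "~":
--                 state = "TILDE2"
--             else:
--                 return False
--         else:  # TILDE2
--             return ch == "~"
--     if state == "MARK":
--         return True
--     return state in ("DASH1", "DASHRUN", "DASHTAIL", "EQRUN", "EQTAIL") and n >= 3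
-- ===== Notes on version B (the rewrite author's own statement) =====
-- stated objective: alternative
-- what changed: Replaces A's staged rule checks (indexing, a digit-scanning while loop, startswith, rstrip plus two all(...) passes) by a single left-to-right finite state machine that reads each character once and decides every rule in one pass.
import Mathlib
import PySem

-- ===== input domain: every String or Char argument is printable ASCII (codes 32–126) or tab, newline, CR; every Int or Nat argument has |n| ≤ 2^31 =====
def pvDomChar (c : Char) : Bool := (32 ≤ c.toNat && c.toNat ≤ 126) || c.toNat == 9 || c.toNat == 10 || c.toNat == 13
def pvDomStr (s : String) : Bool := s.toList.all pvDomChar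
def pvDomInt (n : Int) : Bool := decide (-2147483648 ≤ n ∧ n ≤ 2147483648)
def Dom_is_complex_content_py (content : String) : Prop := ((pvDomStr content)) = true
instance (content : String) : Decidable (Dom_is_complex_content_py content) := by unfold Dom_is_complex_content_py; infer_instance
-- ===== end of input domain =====

-- B replaces A's staged rule checks (digit-scanning while loop, startswith, rstrip + two all(...) passes)
-- by a single left-to-right finite state machine reading each character once (objective: alternative; no speed claim).

-- ===== PORT A =====
-- A's 'while pos < len(content) and content[pos].isdigit(): pos += 1'
def pvDigitScan (l : List Char) (pos : Nat) : Nat :=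
  if h : pos < l.length then
    if PySem.Chars.isdigit l[pos] then pvDigitScan l (pos + 1) else pos
  else pos
termination_by l.length - pos

def is_complex_content_py (content : String) : Bool :=
  match content.toList with
  | [] => false                                   -- if not content: return False
  | first_char :: rest =>
    let l := first_char :: rest
    if first_char = '<' then true                 -- Rule 6
    else if first_char = '>' then true            -- Rule 8
    else if (decide (first_char ∈ ['-', '*', '+']) && decide (1 < l.length)
              && (l[1]? == some ' ' || l[1]? == some '\t')) then true
    else if (PySem.Chars.isdigit first_char &&
              (let pos := pvDigitScan l 0
               decide (pos < l.length) && (l[pos]? == some '.' || l[pos]? == some ')')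
               && ((decide (pos + 1 < l.length) && (l[pos + 1]? == some ' ' || l[pos + 1]? == some '\t'))
                   || decide (pos + 1 = l.length)))) then true
    else if (PySem.Chars.startswith l ['`', '`', '`'] || PySem.Chars.startswith l ['~', '~', '~']) then true
    else if (decide (3 ≤ l.length) &&
              (let stripped := PySem.Chars.rstrip l
               (!stripped.isEmpty && stripped.all (fun ch => ch = '=')) ||
               (!stripped.isEmpty && stripped.all (fun ch => ch = '-')))) then true
    else false

-- ===== PORT B =====
-- the states of Source B's machine
inductive PvSt
  | start | bullet | dash1 | dashRun | dashTail | eqRun | eqTail | digits | mark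
  | btick1 | btick2 | tilde1 | tilde2
deriving DecidableEq

-- 'ch in WS' with WS = " \t\n\r\x0b\x0c"
def pvIsWS (c : Char) : Bool :=
  c = ' ' || c = '\t' || c = '\n' || c = '\r' || c = '\x0b' || c = '\x0c'

-- the 'for ch in content' loop; n counts consumed characters; the [] case is the code after the loop
def pvRun : PvSt → Nat → List Char → Bool
  | st, n, [] =>
      if st = .mark then true
      else (st = .dash1 || st = .dashRun || st = .dashTail || st = .eqRun || st = .eqTail)
             && decide (3 ≤ n)
  | st, n, ch :: rest =>
    match st with
    | .start =>
        if ch = '<' ∨ ch = '>' then true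
        else if ch = '`' then pvRun .btick1 (n + 1) rest
        else if ch = '~' then pvRun .tilde1 (n + 1) rest
        else if ch = '-' then pvRun .dash1 (n + 1) rest
        else if ch = '*' ∨ ch = '+' then pvRun .bullet (n + 1) rest
        else if PySem.Chars.isdigit ch then pvRun .digits (n + 1) rest
        else if ch = '=' then pvRun .eqRun (n + 1) rest
        else false
    | .bullet => ch = ' ' || ch = '\t'
    | .dash1 =>
        if ch = ' ' ∨ ch = '\t' then true
        else if ch = '-' then pvRun .dashRun (n + 1) rest
        else if pvIsWS ch then pvRun .dashTail (n + 1) rest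
        else false
    | .dashRun =>
        if ch = '-' then pvRun .dashRun (n + 1) rest
        else if pvIsWS ch then pvRun .dashTail (n + 1) rest
        else false
    | .dashTail => if pvIsWS ch then pvRun .dashTail (n + 1) rest else false
    | .eqRun =>
        if ch = '=' then pvRun .eqRun (n + 1) rest
        else if pvIsWS ch then pvRun .eqTail (n + 1) rest
        else false
    | .eqTail => if pvIsWS ch then pvRun .eqTail (n + 1) rest else false
    | .digits =>
        if PySem.Chars.isdigit ch then pvRun .digits (n + 1) rest
        else if ch = '.' ∨ ch = ')' then pvRun .mark (n + 1) rest
        else false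
    | .mark => ch = ' ' || ch = '\t'
    | .btick1 => if ch = '`' then pvRun .btick2 (n + 1) rest else false
    | .btick2 => ch = '`'
    | .tilde1 => if ch = '~' then pvRun .tilde2 (n + 1) rest else false
    | .tilde2 => ch = '~'

def is_complex_content_py_alt (content : String) : Bool :=
  pvRun .start 0 content.toList

-- ===== PRECONDITION & SPEC =====
def Spec_is_complex_content_py (content : String) (out : Bool) : Prop := out = is_complex_content_py_alt content
instance (content : String) (out : Bool) : Decidable (Spec_is_complex_content_py content out) := by unfold Spec_is_complex_content_py; infer_instance

-- ===== CLAIM (what is proved, stated in full; the proofs are below) =====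
def Claim_equal_is_complex_content_py : Prop := ∀ (content : String), Dom_is_complex_content_py content → Spec_is_complex_content_py content (is_complex_content_py content)

-- ===== LEMMAS AND PROOFS =====

lemma pv_char_eq_iff (c d : Char) : (c = d) ↔ c.toNat = d.toNat :=
  ⟨fun h => h ▸ rfl, fun h => Char.ext (UInt32.toNat_inj.mp h)⟩

-- on the domain's characters, Source B's WS membership is exactly Python's isspace
lemma pvIsWS_eq_isspace (c : Char) (h : pvDomChar c = true) :
    pvIsWS c = PySem.Chars.isspace c := by
  simp only [pvDomChar, Bool.or_eq_true, Bool.and_eq_true, decide_eq_true_eq, beq_iff_eq] at h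
  rw [Bool.eq_iff_iff]
  simp only [pvIsWS, PySem.Chars.isspace, Bool.or_eq_true, Bool.and_eq_true, decide_eq_true_eq,
    pv_char_eq_iff]
  have h32 : (' ' : Char).toNat = 32 := rfl
  have h9 : ('\t' : Char).toNat = 9 := rfl
  have h10 : ('\n' : Char).toNat = 10 := rfl
  have h13 : ('\r' : Char).toNat = 13 := rfl
  have h11 : ('\x0b' : Char).toNat = 11 := rfl
  have h12 : ('\x0c' : Char).toNat = 12 := rfl
  rw [h32, h9, h10, h13, h11, h12]
  omega

lemma all_ws_congr (l : List Char) (h : ∀ x ∈ l, pvDomChar x = true) :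
    l.all pvIsWS = l.all PySem.Chars.isspace := by
  rw [Bool.eq_iff_iff]
  simp only [List.all_eq_true]
  exact ⟨fun H x hx => by rw [← pvIsWS_eq_isspace x (h x hx)]; exact H x hx,
         fun H x hx => by rw [pvIsWS_eq_isspace x (h x hx)]; exact H x hx⟩

lemma pvDigitScan_eq (l : List Char) : ∀ (n pos : Nat), l.length - pos ≤ n →
    pvDigitScan l pos = pos + ((l.drop pos).takeWhile PySem.Chars.isdigit).length := by
  intro n
  induction n with
  | zero =>
    intro pos h
    rw [pvDigitScan]
    have h1 : ¬ pos < l.length := by omega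
    have h2 : l.drop pos = [] := List.drop_eq_nil_of_le (by omega)
    simp [h1, h2]
  | succ n ih =>
    intro pos h
    rw [pvDigitScan]
    by_cases hp : pos < l.length
    · have hdrop : l.drop pos = l[pos] :: l.drop (pos + 1) := List.drop_eq_getElem_cons hp
      by_cases hd : PySem.Chars.isdigit l[pos]
      · rw [dif_pos hp, if_pos hd, ih (pos + 1) (by omega), hdrop]
        rw [List.takeWhile_cons_of_pos hd]
        simp
        omega
      · rw [dif_pos hp, if_neg hd, hdrop]
        rw [List.takeWhile_cons_of_neg (by simpa using hd)]
        simp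
    · have h2 : l.drop pos = [] := List.drop_eq_nil_of_le (by omega)
      simp [hp, h2]

-- A's positional ordered-list test, in dropWhile normal form
lemma ordered_nf (l : List Char) :
    ((let pos := pvDigitScan l 0
      decide (pos < l.length) && (l[pos]? == some '.' || l[pos]? == some ')')
      && ((decide (pos + 1 < l.length) && (l[pos + 1]? == some ' ' || l[pos + 1]? == some '\t'))
          || decide (pos + 1 = l.length)))
      = (let r := l.dropWhile PySem.Chars.isdigit
         (r.take 1 == ['.'] || r.take 1 == [')']) &&
         ((r.drop 1).take 1 == ([] : List Char) || (r.drop 1).take 1 == [' ']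
           || (r.drop 1).take 1 == ['\t']))) := by
  have hscan : pvDigitScan l 0 = (l.takeWhile PySem.Chars.isdigit).length := by
    simpa using pvDigitScan_eq l l.length 0 (by omega)
  set k := (l.takeWhile PySem.Chars.isdigit).length with hk
  have hsplit : l.takeWhile PySem.Chars.isdigit ++ l.dropWhile PySem.Chars.isdigit = l :=
    List.takeWhile_append_dropWhile
  have hdropk : l.drop k = l.dropWhile PySem.Chars.isdigit := by
    conv_lhs => rw [← hsplit]
    rw [List.drop_left' hk.symm]
  have hlen : l.length = k + (l.dropWhile PySem.Chars.isdigit).length := by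
    conv_lhs => rw [← hsplit]
    rw [List.length_append, ← hk]
  have hg0 : l[k]? = (l.dropWhile PySem.Chars.isdigit)[0]? := by
    rw [← hdropk, List.getElem?_drop]; norm_num
  have hg1 : l[k + 1]? = (l.dropWhile PySem.Chars.isdigit)[1]? := by
    rw [← hdropk, List.getElem?_drop]
  simp only [hscan]
  cases hr : l.dropWhile PySem.Chars.isdigit with
  | nil =>
    rw [hr] at hg0 hlen
    simp [hlen]
  | cons a t =>
    cases t with
    | nil =>
      rw [hr] at hg0 hg1 hlen
      simp only [List.length_cons, List.length_nil] at hlen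
      have hklt : k < l.length := by omega
      have hnlt : ¬ k + 1 < l.length := by omega
      have heq : k + 1 = l.length := by omega
      simp only [hg0, hg1]
      simp [hklt, heq]
    | cons b t' =>
      rw [hr] at hg0 hg1 hlen
      simp only [List.length_cons] at hlen
      have h1' : k < l.length := by omega
      have h2' : k + 1 < l.length := by omega
      have h3' : ¬ (k + 1 = l.length) := by omega
      simp only [hg0, hg1]
      simp [h1', h2', h3']

-- A's setext test (rstrip + all) in head/dropWhile normal form
lemma setext_char (ch : Char) (hch : PySem.Chars.isspace ch = false) (l : List Char) :
    (!(PySem.Chars.rstrip l).isEmpty && (PySem.Chars.rstrip l).all (fun x => x = ch))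
      = (l.head? == some ch && (l.dropWhile (fun x => x = ch)).all PySem.Chars.isspace) := by
  rw [Bool.eq_iff_iff]
  simp only [Bool.and_eq_true, Bool.not_eq_eq_eq_not, Bool.not_true, List.isEmpty_eq_false_iff,
    List.all_eq_true, decide_eq_true_eq, beq_iff_eq, ne_eq]
  constructor
  · rintro ⟨hne, hall⟩
    have hdecomp : PySem.Chars.rstrip l ++ (l.reverse.takeWhile PySem.Chars.isspace).reverse = l := by
      simp only [PySem.Chars.rstrip]
      rw [← List.reverse_append, List.takeWhile_append_dropWhile, List.reverse_reverse]
    set w := (l.reverse.takeWhile PySem.Chars.isspace).reverse with hw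
    have hwss : ∀ x ∈ w, PySem.Chars.isspace x = true := by
      intro x hx
      rw [hw, List.mem_reverse] at hx
      exact List.mem_takeWhile_imp hx
    constructor
    · rw [← hdecomp]
      cases hcase : PySem.Chars.rstrip l with
      | nil => exact absurd hcase hne
      | cons y ys =>
        have hy : y = ch := hall y (by rw [hcase]; exact List.mem_cons_self)
        simp [hy]
    · intro x hx
      rw [← hdecomp, List.dropWhile_append] at hx
      have hnil : (PySem.Chars.rstrip l).dropWhile (fun x => decide (x = ch)) = [] := by
        rw [List.dropWhile_eq_nil_iff]
        intro y hy
        simp [hall y hy]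
      rw [hnil] at hx
      simp only [List.isEmpty_nil, if_true] at hx
      exact hwss x ((List.dropWhile_sublist _).subset hx)
  · rintro ⟨hhead, hws⟩
    cases l with
    | nil => simp at hhead
    | cons a t =>
    have hc0 : a = ch := by simpa using hhead
    rw [hc0] at hws ⊢
    have hsplit := List.takeWhile_append_dropWhile (p := fun x => decide (x = ch)) (l := ch :: t)
    have ha_all : ∀ x ∈ (ch :: t).takeWhile (fun x => decide (x = ch)), x = ch := by
      intro x hx
      simpa using List.mem_takeWhile_imp hx
    have ha_ne : (ch :: t).takeWhile (fun x => decide (x = ch)) ≠ [] := by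
      rw [List.takeWhile_cons_of_pos (by simp)]
      simp
    have hr : PySem.Chars.rstrip (ch :: t) = (ch :: t).takeWhile (fun x => decide (x = ch)) := by
      conv_lhs => rw [← hsplit]
      simp only [PySem.Chars.rstrip, List.reverse_append]
      rw [List.dropWhile_append]
      have h1 : (((ch :: t).dropWhile (fun x => decide (x = ch))).reverse).dropWhile
          PySem.Chars.isspace = [] := by
        rw [List.dropWhile_eq_nil_iff]
        intro y hy
        exact hws y (List.mem_reverse.mp hy)
      rw [h1]
      simp only [List.isEmpty_nil, if_true]
      cases hrev : ((ch :: t).takeWhile (fun x => decide (x = ch))).reverse with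
      | nil => exact absurd (by simpa using congrArg List.reverse hrev) ha_ne
      | cons y ys =>
        have hy : y = ch := ha_all y (List.mem_reverse.mp (by rw [hrev]; exact List.mem_cons_self))
        rw [List.dropWhile_cons_of_neg (by simp [hy, hch])]
        rw [← hrev, List.reverse_reverse]
    rw [hr]
    exact ⟨ha_ne, ha_all⟩

lemma startswith_cons_take (a : Char) (p rest : List Char) :
    PySem.Chars.startswith (a :: rest) (a :: p) = (rest.take p.length == p) := by
  rw [Bool.eq_iff_iff, PySem.Chars.startswith_iff, beq_iff_eq, List.cons_prefix_cons]
  rw [List.prefix_iff_eq_take]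
  exact ⟨fun h => h.2.symm, fun h => ⟨rfl, h.symm⟩⟩

lemma startswith_cons_ne (a b : Char) (p rest : List Char) (h : a ≠ b) :
    PySem.Chars.startswith (a :: rest) (b :: p) = false := by
  rw [Bool.eq_false_iff]
  intro hh
  rw [PySem.Chars.startswith_iff, List.cons_prefix_cons] at hh
  exact h hh.1.symm

-- characterizations of pvRun's states on the remaining input
lemma run_mark (n : Nat) (l : List Char) :
    pvRun .mark n l
      = (l.take 1 == ([] : List Char) || l.take 1 == [' '] || l.take 1 == ['\t']) := by
  cases l with
  | nil => simp [pvRun]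
  | cons x t =>
    simp only [pvRun, List.take_succ_cons, List.take_zero]
    rw [Bool.eq_iff_iff]
    simp

lemma run_bullet (n : Nat) (l : List Char) :
    pvRun .bullet n l = (l.take 1 == [' '] || l.take 1 == ['\t']) := by
  cases l with
  | nil => simp [pvRun]
  | cons x t =>
    simp only [pvRun, List.take_succ_cons, List.take_zero]
    rw [Bool.eq_iff_iff]
    simp

lemma run_btick1 (n : Nat) (l : List Char) :
    pvRun .btick1 n l = (l.take 2 == ['`', '`']) := by
  cases l with
  | nil => simp [pvRun]
  | cons x t =>
    by_cases hx : x = '`'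
    · subst hx
      cases t with
      | nil => simp [pvRun]
      | cons y u =>
        simp only [pvRun]
        rw [Bool.eq_iff_iff]
        simp
    · simp [pvRun, hx]

lemma run_tilde1 (n : Nat) (l : List Char) :
    pvRun .tilde1 n l = (l.take 2 == ['~', '~']) := by
  cases l with
  | nil => simp [pvRun]
  | cons x t =>
    by_cases hx : x = '~'
    · subst hx
      cases t with
      | nil => simp [pvRun]
      | cons y u =>
        simp only [pvRun]
        rw [Bool.eq_iff_iff]
        simp
    · simp [pvRun, hx]

lemma run_eqTail (l : List Char) : ∀ n,
    pvRun .eqTail n l = (l.all pvIsWS && decide (3 ≤ n + l.length)) := by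
  induction l with
  | nil => intro n; simp [pvRun]
  | cons x t ih =>
    intro n
    by_cases hx : pvIsWS x = true
    · have : pvRun .eqTail n (x :: t) = pvRun .eqTail (n + 1) t := by simp [pvRun, hx]
      rw [this, ih (n + 1)]
      have harith : n + 1 + t.length = n + (x :: t).length := by
        simp only [List.length_cons]; omega
      rw [harith]
      simp [hx]
    · simp [pvRun, hx]

lemma run_dashTail (l : List Char) : ∀ n,
    pvRun .dashTail n l = (l.all pvIsWS && decide (3 ≤ n + l.length)) := by
  induction l with
  | nil => intro n; simp [pvRun]
  | cons x t ih =>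
    intro n
    by_cases hx : pvIsWS x = true
    · have : pvRun .dashTail n (x :: t) = pvRun .dashTail (n + 1) t := by simp [pvRun, hx]
      rw [this, ih (n + 1)]
      have harith : n + 1 + t.length = n + (x :: t).length := by
        simp only [List.length_cons]; omega
      rw [harith]
      simp [hx]
    · simp [pvRun, hx]

lemma run_eqRun (l : List Char) : ∀ n,
    pvRun .eqRun n l
      = ((l.dropWhile (fun x => x = '=')).all pvIsWS && decide (3 ≤ n + l.length)) := by
  induction l with
  | nil => intro n; simp [pvRun]
  | cons x t ih =>
    intro n
    have harith : n + 1 + t.length = n + (x :: t).length := by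
      simp only [List.length_cons]; omega
    by_cases hx : x = '='
    · subst hx
      have : pvRun .eqRun n ('=' :: t) = pvRun .eqRun (n + 1) t := by simp [pvRun]
      rw [this, ih (n + 1), List.dropWhile_cons_of_pos (by simp)]
      rw [harith]
    · rw [List.dropWhile_cons_of_neg (by simp [hx])]
      by_cases hws : pvIsWS x = true
      · have : pvRun .eqRun n (x :: t) = pvRun .eqTail (n + 1) t := by simp [pvRun, hx, hws]
        rw [this, run_eqTail t (n + 1), harith]
        simp [hws]
      · simp [pvRun, hx, hws]

lemma run_dashRun (l : List Char) : ∀ n,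
    pvRun .dashRun n l
      = ((l.dropWhile (fun x => x = '-')).all pvIsWS && decide (3 ≤ n + l.length)) := by
  induction l with
  | nil => intro n; simp [pvRun]
  | cons x t ih =>
    intro n
    have harith : n + 1 + t.length = n + (x :: t).length := by
      simp only [List.length_cons]; omega
    by_cases hx : x = '-'
    · subst hx
      have : pvRun .dashRun n ('-' :: t) = pvRun .dashRun (n + 1) t := by simp [pvRun]
      rw [this, ih (n + 1), List.dropWhile_cons_of_pos (by simp)]
      rw [harith]
    · rw [List.dropWhile_cons_of_neg (by simp [hx])]
      by_cases hws : pvIsWS x = true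
      · have : pvRun .dashRun n (x :: t) = pvRun .dashTail (n + 1) t := by simp [pvRun, hx, hws]
        rw [this, run_dashTail t (n + 1), harith]
        simp [hws]
      · simp [pvRun, hx, hws]

lemma run_dash1 (l : List Char) (n : Nat) :
    pvRun .dash1 n l
      = ((l.take 1 == [' '] || l.take 1 == ['\t'])
          || ((l.dropWhile (fun x => x = '-')).all pvIsWS && decide (3 ≤ n + l.length))) := by
  cases l with
  | nil => simp [pvRun]
  | cons x t =>
    have harith : n + 1 + t.length = n + (x :: t).length := by
      simp only [List.length_cons]; omega
    by_cases hsp : x = ' ' ∨ x = '\t'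
    · have h1 : pvRun .dash1 n (x :: t) = true := by simp [pvRun, hsp]
      rw [h1, Bool.eq_iff_iff]
      rcases hsp with h | h <;> subst h <;> simp
    · have hxs : ¬ x = ' ' := fun h => hsp (Or.inl h)
      have hxt : ¬ x = '\t' := fun h => hsp (Or.inr h)
      have htake : ((x :: t).take 1 == [' '] || (x :: t).take 1 == ['\t']) = false := by
        simp [hxs, hxt]
      rw [htake, Bool.false_or]
      by_cases hx : x = '-'
      · subst hx
        have : pvRun .dash1 n ('-' :: t) = pvRun .dashRun (n + 1) t := by
          simp [pvRun, hxs, hxt]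
        rw [this, run_dashRun t (n + 1), List.dropWhile_cons_of_pos (by simp), harith]
      · rw [List.dropWhile_cons_of_neg (by simp [hx])]
        by_cases hws : pvIsWS x = true
        · have : pvRun .dash1 n (x :: t) = pvRun .dashTail (n + 1) t := by
            simp [pvRun, hsp, hx, hws]
          rw [this, run_dashTail t (n + 1), harith]
          simp [hws]
        · simp [pvRun, hsp, hx, hws]

lemma run_digits (l : List Char) : ∀ n,
    pvRun .digits n l
      = (((l.dropWhile PySem.Chars.isdigit).take 1 == ['.']
          || (l.dropWhile PySem.Chars.isdigit).take 1 == [')']) &&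
         (((l.dropWhile PySem.Chars.isdigit).drop 1).take 1 == ([] : List Char)
          || ((l.dropWhile PySem.Chars.isdigit).drop 1).take 1 == [' ']
          || ((l.dropWhile PySem.Chars.isdigit).drop 1).take 1 == ['\t'])) := by
  induction l with
  | nil => intro n; simp [pvRun]
  | cons x t ih =>
    intro n
    by_cases hx : PySem.Chars.isdigit x = true
    · have : pvRun .digits n (x :: t) = pvRun .digits (n + 1) t := by simp [pvRun, hx]
      rw [this, ih (n + 1), List.dropWhile_cons_of_pos hx]
    · rw [List.dropWhile_cons_of_neg (by simpa using hx)]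
      by_cases hm : x = '.' ∨ x = ')'
      · have : pvRun .digits n (x :: t) = pvRun .mark (n + 1) t := by simp [pvRun, hx, hm]
        rw [this, run_mark (n + 1) t, Bool.eq_iff_iff]
        rcases hm with h | h <;> subst h <;> simp
      · have hxd : ¬ x = '.' := fun h => hm (Or.inl h)
        have hxp : ¬ x = ')' := fun h => hm (Or.inr h)
        simp [pvRun, hx, hxd, hxp]

-- the main equivalence
lemma main_eq (content : String) (h : pvDomStr content = true) :
    is_complex_content_py content = is_complex_content_py_alt content := by
  unfold is_complex_content_py is_complex_content_py_alt
  cases hl : content.toList with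
  | nil => simp [pvRun]
  | cons c rest =>
    have hdom : ∀ x ∈ c :: rest, pvDomChar x = true := by
      rw [pvDomStr, hl, List.all_eq_true] at h
      exact h
    have hdomrest : ∀ x ∈ rest, pvDomChar x = true := fun x hx => hdom x (List.mem_cons_of_mem _ hx)
    simp only [pvRun]
    by_cases h1 : c = '<'
    · simp [h1]
    by_cases h2 : c = '>'
    · simp [h2]
    rw [if_neg h1, if_neg h2, if_neg (by tauto : ¬ (c = '<' ∨ c = '>'))]
    -- setext inner expression, rewritten once for all
    have hsetext :
        ((!(PySem.Chars.rstrip (c :: rest)).isEmpty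
            && (PySem.Chars.rstrip (c :: rest)).all (fun ch => ch = '='))
          || (!(PySem.Chars.rstrip (c :: rest)).isEmpty
            && (PySem.Chars.rstrip (c :: rest)).all (fun ch => ch = '-')))
        = (((c :: rest).head? == some '='
              && ((c :: rest).dropWhile (fun x => x = '=')).all PySem.Chars.isspace)
          || ((c :: rest).head? == some '-'
              && ((c :: rest).dropWhile (fun x => x = '-')).all PySem.Chars.isspace)) := by
      rw [setext_char '=' (by decide), setext_char '-' (by decide)]
    by_cases hbq : c = '`'
    · subst hbq
      rw [if_pos rfl]
      have hg3 : decide ('`' ∈ ['-', '*', '+']) = false := by decide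
      have hg4 : PySem.Chars.isdigit '`' = false := by decide
      rw [run_btick1]
      simp only [hg3, hg4, Bool.false_and]
      rw [startswith_cons_take '`' ['`', '`'] rest, startswith_cons_ne '`' '~' _ _ (by decide)]
      simp only [hsetext]
      rw [Bool.eq_iff_iff]
      simp
    by_cases htl : c = '~'
    · subst htl
      rw [if_neg (by decide : ¬ ('~' : Char) = '`'), if_pos rfl]
      have hg3 : decide ('~' ∈ ['-', '*', '+']) = false := by decide
      have hg4 : PySem.Chars.isdigit '~' = false := by decide
      rw [run_tilde1]
      simp only [hg3, hg4, Bool.false_and]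
      rw [startswith_cons_take '~' ['~', '~'] rest, startswith_cons_ne '~' '`' _ _ (by decide)]
      simp only [hsetext]
      rw [Bool.eq_iff_iff]
      simp
    by_cases hdash : c = '-'
    · subst hdash
      rw [if_neg (by decide : ¬ ('-' : Char) = '`'), if_neg (by decide : ¬ ('-' : Char) = '~'),
        if_pos rfl, run_dash1]
      have hg3 : decide ('-' ∈ ['-', '*', '+']) = true := by decide
      have hg4 : PySem.Chars.isdigit '-' = false := by decide
      rw [startswith_cons_ne '-' '`' _ _ (by decide), startswith_cons_ne '-' '~' _ _ (by decide)]
      simp only [hsetext, hg3, hg4, Bool.false_and, Bool.true_and, Bool.or_self]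
      have hdw : ('-' :: rest).dropWhile (fun x => x = '-')
          = rest.dropWhile (fun x => x = '-') := List.dropWhile_cons_of_pos (by simp)
      have hws : (rest.dropWhile (fun x => x = '-')).all pvIsWS
          = (rest.dropWhile (fun x => x = '-')).all PySem.Chars.isspace := by
        refine all_ws_congr _ (fun x hx => hdomrest x ?_)
        exact (List.dropWhile_sublist _).subset hx
      rw [hws]
      rw [Bool.eq_iff_iff]
      cases rest with
      | nil => simp
      | cons y u =>
        simp only [List.length_cons, List.getElem?_cons_succ, List.getElem?_cons_zero,
          List.take_succ_cons, List.take_zero, List.head?_cons, Nat.zero_add]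
        have harith : (3 ≤ u.length + 1 + 1) ↔ (3 ≤ 1 + (u.length + 1)) := by omega
        simp [harith]
        tauto
    by_cases hsp : c = '*' ∨ c = '+'
    · rw [if_neg (by rcases hsp with h | h <;> subst h <;> decide : ¬ c = '`'),
        if_neg (by rcases hsp with h | h <;> subst h <;> decide : ¬ c = '~'),
        if_neg (by rcases hsp with h | h <;> subst h <;> decide : ¬ c = '-'),
        if_pos hsp, run_bullet]
      have hg3 : decide (c ∈ ['-', '*', '+']) = true := by
        rcases hsp with h | h <;> subst h <;> decide
      have hg4 : PySem.Chars.isdigit c = false := by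
        rcases hsp with h | h <;> subst h <;> decide
      rw [startswith_cons_ne c '`' _ _ (by rcases hsp with h | h <;> subst h <;> decide),
        startswith_cons_ne c '~' _ _ (by rcases hsp with h | h <;> subst h <;> decide)]
      simp only [hsetext, hg3, hg4, Bool.false_and, Bool.true_and, List.head?_cons]
      have he1 : (c == '=') = false := by rcases hsp with h | h <;> subst h <;> decide
      have he2 : (c == '-') = false := by rcases hsp with h | h <;> subst h <;> decide
      rw [Bool.eq_iff_iff]
      cases rest with
      | nil => simp [he1, he2]
      | cons y u => simp [he1, he2]
    by_cases hdig : PySem.Chars.isdigit c = true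
    · have hne1 : ¬ c = '`' := fun e => by rw [e] at hdig; exact absurd hdig (by decide)
      have hne2 : ¬ c = '~' := fun e => by rw [e] at hdig; exact absurd hdig (by decide)
      have hne3 : ¬ c = '=' := fun e => by rw [e] at hdig; exact absurd hdig (by decide)
      rw [if_neg hne1, if_neg hne2, if_neg hdash, if_neg hsp, if_pos hdig, run_digits rest 1]
      have hg3 : decide (c ∈ ['-', '*', '+']) = false := by
        simp only [decide_eq_false_iff_not, List.mem_cons, not_or]
        exact ⟨hdash, fun h => hsp (Or.inl h), fun h => hsp (Or.inr h), by simp⟩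
      rw [startswith_cons_ne c '`' _ _ hne1, startswith_cons_ne c '~' _ _ hne2]
      have he1 : (c == '=') = false := by simp [hne3]
      have he2 : (c == '-') = false := by simp [hdash]
      simp only [hsetext, hg3, hdig, Bool.false_and, Bool.true_and, List.head?_cons,
        Bool.or_self, Bool.false_or, Bool.if_false_left]
      rw [ordered_nf (c :: rest)]
      simp only [List.dropWhile_cons_of_pos hdig]
      rw [Bool.eq_iff_iff]
      simp [hne3, hdash]
    by_cases heq : c = '='
    · subst heq
      rw [if_neg (by decide : ¬ ('=' : Char) = '`'), if_neg (by decide : ¬ ('=' : Char) = '~'),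
        if_neg (by decide : ¬ ('=' : Char) = '-'),
        if_neg (by rintro (h | h) <;> exact absurd h (by decide) : ¬ (('=' : Char) = '*' ∨ ('=' : Char) = '+')),
        if_neg (by decide : ¬ PySem.Chars.isdigit '=' = true), if_pos rfl, run_eqRun rest 1]
      have hg3 : decide ('=' ∈ ['-', '*', '+']) = false := by decide
      have hg4 : PySem.Chars.isdigit '=' = false := by decide
      rw [startswith_cons_ne '=' '`' _ _ (by decide), startswith_cons_ne '=' '~' _ _ (by decide)]
      simp only [hsetext, hg3, hg4, Bool.false_and, List.head?_cons, Bool.or_self]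
      have hdw : ('=' :: rest).dropWhile (fun x => x = '=')
          = rest.dropWhile (fun x => x = '=') := List.dropWhile_cons_of_pos (by simp)
      have hws2 : (rest.dropWhile (fun x => x = '=')).all pvIsWS
          = (rest.dropWhile (fun x => x = '=')).all PySem.Chars.isspace := by
        refine all_ws_congr _ (fun x hx => hdomrest x ?_)
        exact (List.dropWhile_sublist _).subset hx
      rw [hws2, hdw, Bool.eq_iff_iff]
      have harith : (3 ≤ (rest.length + 1)) ↔ (3 ≤ 1 + rest.length) := by omega
      simp [harith]
      tauto
    · -- no rule applies: both sides are false
      rw [if_neg hbq, if_neg htl, if_neg hdash, if_neg hsp, if_neg hdig, if_neg heq]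
      have hg3 : decide (c ∈ ['-', '*', '+']) = false := by
        simp only [decide_eq_false_iff_not, List.mem_cons, not_or]
        exact ⟨hdash, fun h => hsp (Or.inl h), fun h => hsp (Or.inr h), by simp⟩
      have hg4 : PySem.Chars.isdigit c = false := by simpa using hdig
      rw [startswith_cons_ne c '`' _ _ hbq, startswith_cons_ne c '~' _ _ htl]
      simp only [hsetext, hg3, hg4, Bool.false_and, List.head?_cons]
      rw [Bool.eq_iff_iff]
      simp [heq, hdash]

-- ===== VERDICT (by name: the statement is the Claim_ definition above) =====
theorem is_complex_content_py_spec : Claim_equal_is_complex_content_py := by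
  intro content hdom
  unfold Spec_is_complex_content_py
  exact main_eq content hdom
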